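-- pv_equiv track=rewrite | github.com/Shona2826/Building_BLocks_of_Competitive | Graph/Alchemy.py | solve
-- ===== SOURCE A (Python) =====
-- def solve(val):
--
-- 	if len(val) == 1:
-- 		return 1
-- 	if len(val) == 2:
-- 		return 0
--
-- 	if len(val)%2 == 0:
-- 		return 0
-- 	while len(val) > 1:
-- 		a = val[:3]
-- 		res1 = a.count(0)
-- 		res2 = a.count(1)
-- 		if res1 == 0 or res2 == 0:
-- 			return 0
-- 		val = val[3:]
-- 		if res1>res2:
-- 			val.insert(0,0)
-- 		else:
-- 			val.insert(0,1)
-- 		if len(val) == 1: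
-- 			return 1
-- ===== SOURCE B (Python) =====
-- def solve(val):
--     n = len(val)
--     if n % 2 == 0:
--         return 0
--     if n == 1:
--         return 1
--     it = iter(val)
--     c = next(it)
--     for x in it:
--         y = next(it)
--         z = (c == 0) + (x == 0) + (y == 0)
--         o = (c == 1) + (x == 1) + (y == 1)
--         if z == 0 or o == 0:
--             return 0
--         c = 0 if z > o else 1
--     return 1
-- ===== Notes on version B (the rewrite author's own statement) =====
-- stated objective: alternative
-- what changed: A repeatedly slices off three elements and rebuilds the list each round; B makes a single left-to-right pass over the list keeping only a running carry value (intended as asymptotically faster on worst-case inputs, but a timing run could not confirm it since A usually exits early).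
import Mathlib
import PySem

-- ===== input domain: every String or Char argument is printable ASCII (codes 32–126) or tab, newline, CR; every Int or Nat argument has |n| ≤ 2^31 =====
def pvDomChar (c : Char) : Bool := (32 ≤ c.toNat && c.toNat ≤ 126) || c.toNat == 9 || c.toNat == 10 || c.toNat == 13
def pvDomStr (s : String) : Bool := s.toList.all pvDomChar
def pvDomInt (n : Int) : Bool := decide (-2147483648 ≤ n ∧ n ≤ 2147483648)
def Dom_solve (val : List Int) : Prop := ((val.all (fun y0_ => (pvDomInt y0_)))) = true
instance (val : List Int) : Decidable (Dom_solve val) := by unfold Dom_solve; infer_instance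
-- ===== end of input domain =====

-- B replaces A's repeated list slicing and rebuilding by a single left-to-right
-- pass that keeps only a running carry value (objective: alternative).

-- ===== PORT A =====
-- A's while loop: the state is the current list; each iteration takes val[:3],
-- counts 0s and 1s, drops three elements and prepends the majority carry.
def solveLoop (val : List Int) : Int :=
  if h : val.length > 1 then
    let a := val.take 3
    let res1 := a.count 0
    let res2 := a.count 1
    if res1 = 0 ∨ res2 = 0 then 0
    else
      let val' := (if res1 > res2 then (0 : Int) else 1) :: val.drop 3
      if hv : val'.length = 1 then 1
      else solveLoop val'
  else 1  -- while-loop exit; unreachable from `solve` (the loop always returns inside)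
termination_by val.length
decreasing_by
  simp only [val', List.length_cons, List.length_drop] at hv ⊢
  omega

def solve (val : List Int) : Int :=
  if val.length = 1 then 1
  else if val.length = 2 then 0
  else if val.length % 2 = 0 then 0
  else solveLoop val

-- ===== PORT B =====
-- Source B's for-loop over the iterator: consume two elements per step, carrying `c`.
def altLoop (c : Int) (rest : List Int) : Int :=
  match rest with
  | [] => 1
  | x :: y :: r =>
      let z : Int := (if c = 0 then 1 else 0) + (if x = 0 then 1 else 0) + (if y = 0 then 1 else 0)
      let o : Int := (if c = 1 then 1 else 0) + (if x = 1 then 1 else 0) + (if y = 1 then 1 else 0)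
      if z = 0 ∨ o = 0 then 0
      else altLoop (if z > o then 0 else 1) r
  | [_] => 0  -- unreachable from `solve_alt` (the total length is odd)

def solve_alt (val : List Int) : Int :=
  if val.length % 2 = 0 then 0
  else if val.length = 1 then 1
  else match val with
    | c :: rest => altLoop c rest
    | [] => 0  -- unreachable: the empty list has even length

-- ===== PRECONDITION & SPEC =====
def Spec_solve (val : List Int) (out : Int) : Prop := out = solve_alt val
instance (val : List Int) (out : Int) : Decidable (Spec_solve val out) := by unfold Spec_solve; infer_instance

-- ===== CLAIM (what is proved, stated in full; the proofs are below) =====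
def Claim_equal_solve : Prop := ∀ (val : List Int), Dom_solve val → Spec_solve val (solve val)

-- ===== LEMMAS AND PROOFS =====

-- counting a value in a three-element list equals the sum of indicator ifs
theorem cnt_eq (c x y v : Int) :
    (([c, x, y].count v : Nat) : Int)
      = (if c = v then 1 else 0) + (if x = v then 1 else 0) + (if y = v then 1 else 0) := by
  by_cases hc : c = v <;> by_cases hx : x = v <;> by_cases hy : y = v <;>
    simp [hc, hx, hy]

-- main loop invariant: on a list `c :: rest` with `rest` of even length, A's
-- slicing loop computes the same value as B's carry loop.
theorem loop_eq (c : Int) (rest : List Int) (h : rest.length % 2 = 0) :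
    solveLoop (c :: rest) = altLoop c rest := by
  induction c, rest using altLoop.induct with
  | case1 c => simp [solveLoop, altLoop]
  | case2 c x y r z o hzo =>
      rw [solveLoop]
      have h1 := cnt_eq c x y 0
      have h2 := cnt_eq c x y 1
      simp only [List.take_succ_cons, List.take_zero] at *
      rw [dif_pos (by simp)]
      rw [if_pos (by omega)]
      conv_rhs => rw [altLoop]
      rw [if_pos hzo]
  | case3 c x y r z o hzo ih =>
      rw [solveLoop]
      have h1 := cnt_eq c x y 0
      have h2 := cnt_eq c x y 1
      simp only [List.take_succ_cons, List.take_zero] at *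
      rw [dif_pos (by simp)]
      rw [if_neg (by omega)]
      conv_rhs => rw [altLoop]
      rw [if_neg hzo]
      simp only [List.drop_succ_cons, List.drop_zero, List.length_cons]
      by_cases hr : r = []
      · subst hr
        simp [altLoop]
      · have hlen : r.length + 1 ≠ 1 := by
          cases r with
          | nil => exact absurd rfl hr
          | cons a t => simp
        rw [dif_neg hlen]
        have hev : r.length % 2 = 0 := by simp at h; omega
        by_cases hgt : List.count 0 [c, x, y] > List.count 1 [c, x, y]
        · rw [if_pos hgt, if_pos (show z > o by omega)]
          rw [if_pos (show z > o by omega)] at ih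
          exact ih hev
        · rw [if_neg hgt, if_neg (show ¬ z > o by omega)]
          rw [if_neg (show ¬ z > o by omega)] at ih
          exact ih hev
  | case4 c a => simp at h

-- ===== VERDICT (by name: the statement is the Claim_ definition above) =====
theorem solve_spec : Claim_equal_solve := by
  unfold Claim_equal_solve
  intro val _
  unfold Spec_solve
  cases val with
  | nil => simp [solve, solve_alt]
  | cons c rest =>
    cases rest with
    | nil => simp [solve, solve_alt]
    | cons x t =>
      by_cases hp : (c :: x :: t).length % 2 = 0
      · have h1 : (c :: x :: t).length ≠ 1 := by simp
        simp only [solve, solve_alt, if_neg h1, if_pos hp]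
        split_ifs <;> rfl
      · have hev : (x :: t).length % 2 = 0 := by
          simp only [List.length_cons] at hp ⊢; omega
        have h1 : (c :: x :: t).length ≠ 1 := by simp
        have h2 : (c :: x :: t).length ≠ 2 := by
          simp only [List.length_cons] at hp ⊢; omega
        simp only [solve, solve_alt, if_neg h1, if_neg h2, if_neg hp]
        exact loop_eq c (x :: t) hev
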